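-- pv_equiv track=rewrite | github.com/emilysombra/urionlinejudge | CodeBuilder/teste.py | crip2
-- ===== SOURCE A (Python) =====
-- def crip2(str):
-- 	crip = ""
-- 	for i in range(len(str)):
-- 		c = str[i]
-- 		if(i >= len(str)/2 and len(str) % 2 == 0):
-- 			c = ord(c) - 1
-- 			c = chr(c)
-- 		elif(i >= len(str)/2 -1 and len(str) % 2 != 0):
-- 			c = ord(c) - 1
-- 			c = chr(c)
--
-- 		crip += c
--
-- 	return crip
-- ===== SOURCE B (Python) =====
-- def crip2(str):
--     mid = len(str) // 2
--     return str[:mid] + "".join(chr(ord(c) - 1) for c in str[mid:])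
-- ===== Notes on version B (the rewrite author's own statement) =====
-- stated objective: simpler
-- what changed: Replaces the per-index branching pass (with separate even/odd float-comparison branches and string += accumulation) by a split at mid = len//2: verbatim prefix plus a decrement-mapped suffix joined once.
import Mathlib
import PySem

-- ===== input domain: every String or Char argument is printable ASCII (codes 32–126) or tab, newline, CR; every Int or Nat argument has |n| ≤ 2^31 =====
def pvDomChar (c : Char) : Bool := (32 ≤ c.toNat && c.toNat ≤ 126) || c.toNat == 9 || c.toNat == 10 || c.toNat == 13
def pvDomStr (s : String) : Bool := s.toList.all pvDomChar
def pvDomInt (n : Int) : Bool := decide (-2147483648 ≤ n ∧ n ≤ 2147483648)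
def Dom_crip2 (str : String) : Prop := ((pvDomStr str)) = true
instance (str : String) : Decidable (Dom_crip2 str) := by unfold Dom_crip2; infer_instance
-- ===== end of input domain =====

-- B splits at mid = len//2 (verbatim prefix ++ decrement-mapped suffix) instead of A's
-- per-index branching pass with separate even/odd float-threshold branches.


-- ===== PORT A =====
-- 'i >= len(str)/2' on ints is exactly '2*i ≥ n'; 'i >= len(str)/2 - 1' is exactly '2*i ≥ n - 2'
-- (here as '2*i + 2 ≥ n' over Nat); both float comparisons are exact at these magnitudes.
def crip2 (str : String) : String :=
  let s := str.toList
  let n := s.length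
  String.ofList ((List.range n).foldl (fun crip i =>
    let c := s.getD i ' '
    let c := if 2 * i ≥ n ∧ n % 2 = 0 then Char.ofNat (c.toNat - 1)
             else if 2 * i + 2 ≥ n ∧ n % 2 ≠ 0 then Char.ofNat (c.toNat - 1)
             else c
    crip ++ [c]) [])

-- ===== PORT B =====
def crip2_alt (str : String) : String :=
  let s := str.toList
  let mid := s.length / 2
  String.ofList (s.take mid ++ (s.drop mid).map (fun c => Char.ofNat (c.toNat - 1)))

-- ===== PRECONDITION & SPEC =====
def Spec_crip2 (str : String) (out : String) : Prop := out = crip2_alt str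
instance (str : String) (out : String) : Decidable (Spec_crip2 str out) := by unfold Spec_crip2; infer_instance

-- ===== CLAIM (what is proved, stated in full; the proofs are below) =====
def Claim_equal_crip2 : Prop := ∀ (str : String), Dom_crip2 str → Spec_crip2 str (crip2 str)

-- ===== LEMMAS AND PROOFS =====

lemma foldl_append_map (n : Nat) (h : Nat → Char) :
    ∀ acc : List Char, (List.range n).foldl (fun crip i => crip ++ [h i]) acc
      = acc ++ (List.range n).map h := by
  induction n with
  | zero => simp
  | succ m ih =>
    intro acc
    rw [List.range_succ, List.foldl_append, ih]
    simp

lemma range_map_split (s : List Char) (h : Nat → Char)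
    (hlow : ∀ i, i < s.length / 2 → h i = s.getD i ' ')
    (hhigh : ∀ i, s.length / 2 ≤ i → i < s.length → h i = Char.ofNat ((s.getD i ' ').toNat - 1)) :
    (List.range s.length).map h
      = s.take (s.length / 2) ++ (s.drop (s.length / 2)).map (fun c => Char.ofNat (c.toNat - 1)) := by
  apply List.ext_getElem
  · simp [Nat.min_eq_left (Nat.div_le_self _ _)]
    omega
  · intro i h1 h2
    have hi : i < s.length := by simpa using h1
    by_cases hc : i < s.length / 2
    · rw [List.getElem_map, List.getElem_range, hlow i hc]
      rw [List.getElem_append_left (by simpa [Nat.min_eq_left (Nat.div_le_self s.length 2)] using hc)]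
      simp [List.getD, List.getElem?_eq_getElem hi]
    · rw [Nat.not_lt] at hc
      have hmin : min (s.length / 2) s.length = s.length / 2 :=
        Nat.min_eq_left (Nat.div_le_self _ _)
      rw [List.getElem_map, List.getElem_range, hhigh i hc hi]
      rw [List.getElem_append_right (by simpa [hmin] using hc)]
      simp [hmin, List.getD, List.getElem?_eq_getElem hi,
            List.getElem_drop, Nat.add_sub_cancel' hc]

-- ===== VERDICT (by name: the statement is the Claim_ definition above) =====
theorem crip2_spec : Claim_equal_crip2 := by
  intro str _
  unfold Spec_crip2 crip2 crip2_alt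
  simp only []
  congr 1
  set s := str.toList
  set n := s.length with hn
  rw [foldl_append_map n (fun i =>
        if 2 * i ≥ n ∧ n % 2 = 0 then Char.ofNat ((s.getD i ' ').toNat - 1)
        else if 2 * i + 2 ≥ n ∧ n % 2 ≠ 0 then Char.ofNat ((s.getD i ' ').toNat - 1)
        else s.getD i ' ')]
  rw [List.nil_append]
  apply range_map_split
  · intro i hi
    have h1 : ¬ (2 * i ≥ n ∧ n % 2 = 0) := by omega
    have h2 : ¬ (2 * i + 2 ≥ n ∧ n % 2 ≠ 0) := by omega
    simp only [if_neg h1, if_neg h2]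
  · intro i hi _
    by_cases he : n % 2 = 0
    · have : 2 * i ≥ n := by omega
      simp [this, he]
    · have h1 : ¬ (2 * i ≥ n ∧ n % 2 = 0) := by tauto
      have h2 : 2 * i + 2 ≥ n ∧ n % 2 ≠ 0 := ⟨by omega, he⟩
      simp [h1, h2]
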